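-- pv_equiv track=rewrite | github.com/j-grasp/Network_Scan_Auto | Debian-Ubuntu/report_generator.py | extract_cves
-- ===== SOURCE A (Python) =====
-- SEVERITY_ORDER = ["CRITICAL", "HIGH", "MEDIUM", "LOW", "INFO"]
--
-- def classify_severity(text: str) -> str:
--     t = text.lower()
--     if any(k in t for k in ["critical", "cvss: 9", "cvss: 10", "cvss:9", "cvss:10"]):
--         return "CRITICAL"
--     if any(k in t for k in ["high", "cvss: 7", "cvss: 8", "cvss:7", "cvss:8"]):
--         return "HIGH"
--     if any(k in t for k in ["medium", "cvss: 5", "cvss: 6", "cvss:5", "cvss:6"]):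
--         return "MEDIUM"
--     if any(k in t for k in ["low", "cvss: 3", "cvss: 4", "cvss:3", "cvss:4"]):
--         return "LOW"
--     return "INFO"
--
-- def extract_cves(scripts: dict) -> list:
--     """Return list of {cve_id, detail, severity, script} from NSE output."""
--     cves = []
--     seen = set()
--     for script_name, output in (scripts or {}).items():
--         if not output:
--             continue
--         for line in output.splitlines():
--             if "CVE-" in line:
--                 parts = line.split()
--                 cve_id = next(
--                     (p.strip("(),") for p in parts if p.startswith("CVE-")),
--                     "CVE-UNKNOWN"
--                 )
--                 key = f"{cve_id}:{script_name}"
--                 if key in seen: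
--                     continue
--                 seen.add(key)
--                 cves.append({
--                     "cve_id":   cve_id,
--                     "detail":   line.strip(),
--                     "severity": classify_severity(line),
--                     "script":   script_name,
--                 })
--     return sorted(cves, key=lambda c: SEVERITY_ORDER.index(c["severity"]))
-- ===== SOURCE B (Python) =====
-- SEVERITY_ORDER = ["CRITICAL", "HIGH", "MEDIUM", "LOW", "INFO"]
--
-- def classify_severity(text: str) -> str:
--     t = text.lower()
--     if any(k in t for k in ["critical", "cvss: 9", "cvss: 10", "cvss:9", "cvss:10"]):
--         return "CRITICAL"
--     if any(k in t for k in ["high", "cvss: 7", "cvss: 8", "cvss:7", "cvss:8"]):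
--         return "HIGH"
--     if any(k in t for k in ["medium", "cvss: 5", "cvss: 6", "cvss:5", "cvss:6"]):
--         return "MEDIUM"
--     if any(k in t for k in ["low", "cvss: 3", "cvss: 4", "cvss:3", "cvss:4"]):
--         return "LOW"
--     return "INFO"
--
-- def extract_cves(scripts: dict) -> list:
--     """Bucket (distribution) sort: one list per severity, concatenated at the end."""
--     seen = set()
--     crit, high, med, low, info = [], [], [], [], []
--     for script_name, output in (scripts or {}).items():
--         if not output:
--             continue
--         for line in output.splitlines():
--             if "CVE-" not in line:
--                 continue
--             cve_id = next(
--                 (p.strip("(),") for p in line.split() if p.startswith("CVE-")),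
--                 "CVE-UNKNOWN"
--             )
--             key = cve_id + ":" + script_name
--             if key in seen:
--                 continue
--             seen.add(key)
--             sev = classify_severity(line)
--             rec = {"cve_id": cve_id, "detail": line.strip(),
--                    "severity": sev, "script": script_name}
--             if sev == "CRITICAL":
--                 crit.append(rec)
--             elif sev == "HIGH":
--                 high.append(rec)
--             elif sev == "MEDIUM":
--                 med.append(rec)
--             elif sev == "LOW":
--                 low.append(rec)
--             else:
--                 info.append(rec)
--     return crit + high + med + low + info
-- ===== Notes on version B (the rewrite author's own statement) =====
-- stated objective: alternative
-- what changed: The final stable comparison sort by severity rank is replaced by distribution into five per-severity buckets filled during the single dedup pass and concatenated in SEVERITY_ORDER (bucket sort).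
import Mathlib
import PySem

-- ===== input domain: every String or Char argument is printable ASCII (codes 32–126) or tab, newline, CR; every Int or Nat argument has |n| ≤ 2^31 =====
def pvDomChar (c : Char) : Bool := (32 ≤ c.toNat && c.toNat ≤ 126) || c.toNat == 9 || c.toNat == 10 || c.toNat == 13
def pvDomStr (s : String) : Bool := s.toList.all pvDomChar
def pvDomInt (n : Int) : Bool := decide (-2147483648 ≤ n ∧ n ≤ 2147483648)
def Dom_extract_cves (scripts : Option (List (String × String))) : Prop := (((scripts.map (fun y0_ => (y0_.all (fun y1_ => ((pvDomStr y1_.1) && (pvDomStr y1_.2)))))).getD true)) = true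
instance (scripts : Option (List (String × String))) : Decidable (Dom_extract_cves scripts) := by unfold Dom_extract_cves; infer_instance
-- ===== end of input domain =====

-- B replaces A's final comparison sort by distribution into five severity buckets
-- concatenated in SEVERITY_ORDER (same single dedup pass); objective: alternative.

-- ===== PORT A =====
-- shared module-level helpers (same module functions in both Pythons)
def SEVERITY_ORDER : List String := ["CRITICAL", "HIGH", "MEDIUM", "LOW", "INFO"]

def classify_severity (text : String) : String :=
  let t := PySem.Str.lower text
  if ["critical", "cvss: 9", "cvss: 10", "cvss:9", "cvss:10"].any (fun k => PySem.Str.isIn k t) then "CRITICAL"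
  else if ["high", "cvss: 7", "cvss: 8", "cvss:7", "cvss:8"].any (fun k => PySem.Str.isIn k t) then "HIGH"
  else if ["medium", "cvss: 5", "cvss: 6", "cvss:5", "cvss:6"].any (fun k => PySem.Str.isIn k t) then "MEDIUM"
  else if ["low", "cvss: 3", "cvss: 4", "cvss:3", "cvss:4"].any (fun k => PySem.Str.isIn k t) then "LOW"
  else "INFO"

-- next((p.strip("(),") for p in line.split() if p.startswith("CVE-")), "CVE-UNKNOWN")
def cveIdOf (line : String) : String :=
  match (PySem.Str.split₀ line).find? (fun p => PySem.Str.startswith p "CVE-") with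
  | some p => PySem.Str.stripChars p "(),"
  | none => "CVE-UNKNOWN"

-- the record dict {"cve_id": …, "detail": …, "severity": …, "script": …}
def mkRec (cve_id line sev script : String) : List (String × String) :=
  [("cve_id", cve_id), ("detail", PySem.Str.strip line), ("severity", sev), ("script", script)]

-- A's sort key: SEVERITY_ORDER.index(c["severity"]); index? is always `some` here
-- (classify_severity only returns members of SEVERITY_ORDER), so getD 0 is never used.
def sevKey (c : List (String × String)) : Nat :=
  (PySem.List.index? SEVERITY_ORDER ((PySem.Dict.mk c).getD "severity" "")).getD 0

-- A's per-line step: append to the flat list, dedup via seen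
def aLine (script : String) (st : List (List (String × String)) × PySem.Set String)
    (line : String) : List (List (String × String)) × PySem.Set String :=
  if PySem.Str.isIn "CVE-" line then
    let cve_id := cveIdOf line
    let key := cve_id ++ ":" ++ script
    if PySem.Set.contains st.2 key then st
    else (st.1 ++ [mkRec cve_id line (classify_severity line) script], PySem.Set.add st.2 key)
  else st

def extract_cves (scripts : Option (List (String × String))) : List (List (String × String)) :=
  let st := (PySem.Dict.ofList (scripts.getD [])).items.foldl
    (fun st sp => if sp.2 = "" then st
                  else (PySem.Str.splitlines sp.2).foldl (aLine sp.1) st)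
    ([], PySem.Set.empty)
  PySem.List.sorted st.1 sevKey false

-- ===== PORT B =====
structure BState where
  seen : PySem.Set String
  crit : List (List (String × String))
  high : List (List (String × String))
  med  : List (List (String × String))
  low  : List (List (String × String))
  info : List (List (String × String))

-- B's per-line step: same dedup, but the record goes into its severity bucket
def bLine (script : String) (st : BState) (line : String) : BState :=
  if PySem.Str.isIn "CVE-" line then
    let cve_id := cveIdOf line
    let key := cve_id ++ ":" ++ script
    if PySem.Set.contains st.seen key then st
    else
      let sev := classify_severity line
      let r := mkRec cve_id line sev script
      let st' : BState := { st with seen := PySem.Set.add st.seen key }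
      if sev = "CRITICAL" then { st' with crit := st'.crit ++ [r] }
      else if sev = "HIGH" then { st' with high := st'.high ++ [r] }
      else if sev = "MEDIUM" then { st' with med := st'.med ++ [r] }
      else if sev = "LOW" then { st' with low := st'.low ++ [r] }
      else { st' with info := st'.info ++ [r] }
  else st

def bLines (script : String) : List String → BState → BState
  | [], st => st
  | l :: ls, st => bLines script ls (bLine script st l)

def bScripts : List (String × String) → BState → BState
  | [], st => st
  | (name, out) :: rest, st =>
      bScripts rest (if out = "" then st else bLines name (PySem.Str.splitlines out) st)

def extract_cves_alt (scripts : Option (List (String × String))) : List (List (String × String)) :=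
  let st := bScripts (PySem.Dict.ofList (scripts.getD [])).items
    ⟨PySem.Set.empty, [], [], [], [], []⟩
  st.crit ++ st.high ++ st.med ++ st.low ++ st.info

-- ===== PRECONDITION & SPEC =====
def Spec_extract_cves (scripts : Option (List (String × String))) (out : List (List (String × String))) : Prop := out = extract_cves_alt scripts
instance (scripts : Option (List (String × String))) (out : List (List (String × String))) : Decidable (Spec_extract_cves scripts out) := by unfold Spec_extract_cves; infer_instance

-- ===== CLAIM (what is proved, stated in full; the proofs are below) =====
def Claim_equal_extract_cves : Prop := ∀ (scripts : Option (List (String × String))), Dom_extract_cves scripts → Spec_extract_cves scripts (extract_cves scripts)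

-- ===== LEMMAS AND PROOFS =====

-- classify_severity only ever returns one of the five severities
theorem classify_cases (l : String) :
    classify_severity l = "CRITICAL" ∨ classify_severity l = "HIGH" ∨
    classify_severity l = "MEDIUM" ∨ classify_severity l = "LOW" ∨
    classify_severity l = "INFO" := by
  simp only [classify_severity]
  split_ifs <;> simp

theorem sevKey_mkRec (a b d sev : String) :
    sevKey (mkRec a b sev d) =
      (PySem.List.index? SEVERITY_ORDER sev).getD 0 := rfl

-- relation between A's loop state and B's loop state
def RelAB (a : List (List (String × String)) × PySem.Set String) (b : BState) : Prop :=
  b.seen = a.2 ∧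
  (∀ c ∈ a.1, sevKey c ≤ 4) ∧
  b.crit = a.1.filter (fun c => sevKey c == 0) ∧
  b.high = a.1.filter (fun c => sevKey c == 1) ∧
  b.med  = a.1.filter (fun c => sevKey c == 2) ∧
  b.low  = a.1.filter (fun c => sevKey c == 3) ∧
  b.info = a.1.filter (fun c => sevKey c == 4)

theorem rel_line (script line : String) (a : List (List (String × String)) × PySem.Set String)
    (b : BState) (h : RelAB a b) : RelAB (aLine script a line) (bLine script b line) := by
  obtain ⟨hseen, h5, hc, hh, hm, hl, hi⟩ := h
  unfold aLine bLine
  by_cases h1 : PySem.Str.isIn "CVE-" line = true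
  · simp only [h1, if_true, hseen]
    by_cases h2 : PySem.Set.contains a.2 (cveIdOf line ++ ":" ++ script) = true
    · simp only [h2, if_true]
      exact ⟨hseen, h5, hc, hh, hm, hl, hi⟩
    · simp only [h2, if_false, Bool.false_eq_true]
      have h5' : ∀ sev, sev ∈ SEVERITY_ORDER →
          ∀ c ∈ a.1 ++ [mkRec (cveIdOf line) line sev script], sevKey c ≤ 4 := by
        intro sev hsev c hcm
        rcases List.mem_append.mp hcm with hcm | hcm
        · exact h5 c hcm
        · simp only [List.mem_singleton] at hcm
          subst hcm
          rw [sevKey_mkRec]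
          fin_cases hsev <;> decide
      have k0 : ∀ u v w, sevKey (mkRec u v "CRITICAL" w) = 0 := fun _ _ _ => rfl
      have k1 : ∀ u v w, sevKey (mkRec u v "HIGH" w) = 1 := fun _ _ _ => rfl
      have k2 : ∀ u v w, sevKey (mkRec u v "MEDIUM" w) = 2 := fun _ _ _ => rfl
      have k3 : ∀ u v w, sevKey (mkRec u v "LOW" w) = 3 := fun _ _ _ => rfl
      have k4 : ∀ u v w, sevKey (mkRec u v "INFO" w) = 4 := fun _ _ _ => rfl
      rcases classify_cases line with hs | hs | hs | hs | hs <;>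
        rw [hs] <;>
        simp only [String.reduceEq, if_true, if_false] <;>
        refine ⟨rfl, h5' _ (by rw [SEVERITY_ORDER]; simp), ?_, ?_, ?_, ?_, ?_⟩ <;>
        simp [List.filter_append, k0, k1, k2, k3, k4,
              hc, hh, hm, hl, hi]
  · simp only [h1, Bool.false_eq_true, if_false]
    exact ⟨hseen, h5, hc, hh, hm, hl, hi⟩

theorem rel_lines (script : String) (ls : List String)
    (a : List (List (String × String)) × PySem.Set String) (b : BState) (h : RelAB a b) :
    RelAB (ls.foldl (aLine script) a) (bLines script ls b) := by
  induction ls generalizing a b with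
  | nil => exact h
  | cons l ls ih => exact ih _ _ (rel_line script l a b h)

theorem rel_scripts (items : List (String × String))
    (a : List (List (String × String)) × PySem.Set String) (b : BState) (h : RelAB a b) :
    RelAB (items.foldl
      (fun st sp => if sp.2 = "" then st
                    else (PySem.Str.splitlines sp.2).foldl (aLine sp.1) st) a)
      (bScripts items b) := by
  induction items generalizing a b with
  | nil => exact h
  | cons sp rest ih =>
      obtain ⟨name, out⟩ := sp
      simp only [List.foldl, bScripts]
      split
      · exact ih _ _ h
      · exact ih _ _ (rel_lines _ _ _ _ h)

theorem insertBy_all_before {α : Type} (before : α → α → Bool) (x : α) (ys : List α)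
    (h : ∀ y ∈ ys, before x y = true) :
    PySem.List.insertBy before x ys = x :: ys := by
  cases ys with
  | nil => rfl
  | cons y ys => simp [PySem.List.insertBy, h y (by simp)]

theorem insertBy_append {α : Type} (before : α → α → Bool) (x : α) (pre suf : List α)
    (hpre : ∀ y ∈ pre, before x y = false) :
    PySem.List.insertBy before x (pre ++ suf) = pre ++ PySem.List.insertBy before x suf := by
  induction pre with
  | nil => rfl
  | cons y pre ih =>
      simp only [List.cons_append, PySem.List.insertBy, hpre y (by simp)]
      simp only [Bool.false_eq_true, if_false, List.cons.injEq, true_and]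
      exact ih (fun z hz => hpre z (by simp [hz]))

-- a stable sort whose keys all lie in {0,…,4} is the concatenation of its key-fibres
theorem sorted_eq_filters {α : Type} (key : α → Nat) (xs : List α)
    (h : ∀ x ∈ xs, key x ≤ 4) :
    PySem.List.sorted xs key false =
      xs.filter (fun x => key x == 0) ++ xs.filter (fun x => key x == 1) ++
      xs.filter (fun x => key x == 2) ++ xs.filter (fun x => key x == 3) ++
      xs.filter (fun x => key x == 4) := by
  induction xs using List.reverseRecOn with
  | nil => rfl
  | append_singleton xs x ih =>
    have hx : key x ≤ 4 := h x (by simp)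
    have hxs : ∀ y ∈ xs, key y ≤ 4 := fun y hy => h y (by simp [hy])
    have hstep : PySem.List.sorted (xs ++ [x]) key false =
        PySem.List.insertBy (fun a b => decide (key a < key b)) x
          (PySem.List.sorted xs key false) := by
      rw [PySem.List.sorted_eq_foldl_insertBy, PySem.List.sorted_eq_foldl_insertBy,
        List.foldl_append]
      rfl
    have hf : ∀ i : Nat, ∀ y ∈ xs.filter (fun c => key c == i), key y = i := by
      intro i y hy
      simpa using (List.mem_filter.mp hy).2
    rw [hstep, ih hxs]
    simp only [List.filter_append, List.append_assoc]
    interval_cases hk : key x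
    · rw [insertBy_append _ _ _ _ (fun y hy => by simp [hf 0 y hy, hk]),
          insertBy_all_before _ _ _ (by
            intro y hy
            simp only [List.mem_append] at hy
            rcases hy with hy | hy | hy | hy <;> simp [hf _ y hy, hk])]
      simp [hk]
    · rw [insertBy_append _ _ _ _ (fun y hy => by simp [hf 0 y hy, hk]),
          insertBy_append _ _ _ _ (fun y hy => by simp [hf 1 y hy, hk]),
          insertBy_all_before _ _ _ (by
            intro y hy
            simp only [List.mem_append] at hy
            rcases hy with hy | hy | hy <;> simp [hf _ y hy, hk])]
      simp [hk]
    · rw [insertBy_append _ _ _ _ (fun y hy => by simp [hf 0 y hy, hk]),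
          insertBy_append _ _ _ _ (fun y hy => by simp [hf 1 y hy, hk]),
          insertBy_append _ _ _ _ (fun y hy => by simp [hf 2 y hy, hk]),
          insertBy_all_before _ _ _ (by
            intro y hy
            simp only [List.mem_append] at hy
            rcases hy with hy | hy <;> simp [hf _ y hy, hk])]
      simp [hk]
    · rw [insertBy_append _ _ _ _ (fun y hy => by simp [hf 0 y hy, hk]),
          insertBy_append _ _ _ _ (fun y hy => by simp [hf 1 y hy, hk]),
          insertBy_append _ _ _ _ (fun y hy => by simp [hf 2 y hy, hk]),
          insertBy_append _ _ _ _ (fun y hy => by simp [hf 3 y hy, hk]),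
          insertBy_all_before _ _ _ (fun y hy => by simp [hf 4 y hy, hk])]
      simp [hk]
    · rw [insertBy_append _ _ _ _ (fun y hy => by simp [hf 0 y hy, hk]),
          insertBy_append _ _ _ _ (fun y hy => by simp [hf 1 y hy, hk]),
          insertBy_append _ _ _ _ (fun y hy => by simp [hf 2 y hy, hk]),
          insertBy_append _ _ _ _ (fun y hy => by simp [hf 3 y hy, hk]),
          PySem.List.insertBy_of_forall_not_before _ _ _ (fun y hy => by simp [hf 4 y hy, hk])]
      simp [hk]

-- ===== VERDICT (by name: the statement is the Claim_ definition above) =====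
theorem extract_cves_spec : Claim_equal_extract_cves := by
  intro scripts _
  unfold Spec_extract_cves extract_cves extract_cves_alt
  have h0 : RelAB ([], PySem.Set.empty) ⟨PySem.Set.empty, [], [], [], [], []⟩ := by
    refine ⟨rfl, by simp, ?_, ?_, ?_, ?_, ?_⟩ <;> rfl
  have h := rel_scripts (PySem.Dict.ofList (scripts.getD [])).items _ _ h0
  obtain ⟨-, h5, hc, hh, hm, hl, hi⟩ := h
  simp only []
  rw [sorted_eq_filters _ _ h5, hc, hh, hm, hl, hi]
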